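-- pv_equiv track=rewrite | github.com/ClementCadieux/AdventOfCode | 2023/Day13/main1.py | gridToNums
-- ===== SOURCE A (Python) =====
-- def gridToNums(allGrids):
--     numGrids = []
--
--     for grid in allGrids:
--         numLines = []
--         numCols = []
--         for line in grid:
--             numLines.append(lineToNum(line))
--
--         for i in range(len(grid[0])):
--             numCols.append(colToNum(grid, i))
--
--         numGrids.append((numLines, numCols))
--
--     return numGrids
--
-- def lineToNum(line):
--     val = 0
--
--     for i in range(len(line)):
--         if line[i] == "#":
--             val += 2**i
--
--     return val
--
-- def colToNum(grid, i):
--     val = 0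
--
--     for rowI in range(len(grid)):
--         if grid[rowI][i] == "#":
--             val += 2**rowI
--
--     return val
-- ===== SOURCE B (Python) =====
-- def gridToNums(allGrids):
--     numGrids = []
--     for grid in allGrids:
--         width = len(grid[0])
--         numLines = []
--         numCols = [0] * width
--         for r, row in enumerate(grid):
--             numLines.append(sum(1 << i for i, ch in enumerate(row) if ch == "#"))
--             for c in range(width):
--                 if row[c] == "#":
--                     numCols[c] += 1 << r
--         numGrids.append((numLines, numCols))
--     return numGrids
-- ===== Notes on version B (the rewrite author's own statement) =====
-- stated objective: alternative
-- what changed: Single row-major pass per grid that builds each row's bitmask and simultaneously accumulates running column-mask accumulators, instead of A's second nested loop that rescans the whole grid once per column.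
import Mathlib
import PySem

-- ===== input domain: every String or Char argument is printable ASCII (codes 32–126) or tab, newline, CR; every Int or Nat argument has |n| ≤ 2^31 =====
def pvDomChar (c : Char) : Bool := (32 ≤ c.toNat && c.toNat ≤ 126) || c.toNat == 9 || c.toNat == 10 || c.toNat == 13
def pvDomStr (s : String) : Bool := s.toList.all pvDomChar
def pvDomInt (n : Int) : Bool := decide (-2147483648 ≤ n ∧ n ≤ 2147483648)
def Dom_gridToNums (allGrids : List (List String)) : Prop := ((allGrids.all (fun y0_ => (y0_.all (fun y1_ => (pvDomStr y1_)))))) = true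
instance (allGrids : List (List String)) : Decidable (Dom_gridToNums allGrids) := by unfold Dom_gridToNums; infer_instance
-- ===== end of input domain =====

-- B makes one fused row-major pass per grid (row masks + running column-mask accumulators)
-- instead of A's per-column rescans; an alternative traversal with the same return values.

-- ===== PORT A =====
def lineToNum (line : String) : Int :=
  (PySem.List.pyRange 0 (PySem.Str.len line) 1).foldl
    (fun val i => if PySem.List.pyGetD line.toList i ' ' = '#' then val + 2 ^ i.toNat else val) 0

def colToNum (grid : List String) (i : Int) : Int :=
  (PySem.List.pyRange 0 (grid.length : Int) 1).foldl
    (fun val rowI =>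
      if PySem.List.pyGetD (PySem.List.pyGetD grid rowI "").toList i ' ' = '#'
      then val + 2 ^ rowI.toNat else val) 0

def gridToNums (allGrids : List (List String)) : List (List Int × List Int) :=
  allGrids.foldl
    (fun numGrids grid =>
      let numLines := grid.foldl (fun acc line => acc ++ [lineToNum line]) []
      let numCols :=
        (PySem.List.pyRange 0 (PySem.Str.len (PySem.List.pyGetD grid 0 "")) 1).foldl
          (fun acc i => acc ++ [colToNum grid i]) []
      numGrids ++ [(numLines, numCols)]) []

-- ===== PORT B =====
def rowMask (row : String) : Int :=
  ((((PySem.List.enumerate row.toList)).filter (fun p => p.2 = '#')).map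
    (fun p => (1 : Int) <<< p.1.toNat)).sum

def bAddRow (width : Int) (row : List Char) (r : Nat) (cols : List Int) : List Int :=
  (PySem.List.pyRange 0 width 1).foldl
    (fun cs c =>
      if PySem.List.pyGetD row c ' ' = '#'
      then cs.set c.toNat (PySem.List.pyGetD cs c 0 + (1 <<< r))
      else cs) cols

def gridToNums_alt (allGrids : List (List String)) : List (List Int × List Int) :=
  allGrids.foldl
    (fun acc grid =>
      let width := PySem.Str.len (PySem.List.pyGetD grid 0 "")
      let st :=
        (PySem.List.enumerate grid).foldl
          (fun (st : List Int × List Int) p =>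
            (st.1 ++ [rowMask p.2], bAddRow width p.2.toList p.1.toNat st.2))
          ([], List.replicate width.toNat 0)
      acc ++ [(st.1, st.2)]) []

-- ===== PRECONDITION & SPEC =====
-- Pre_ excludes exactly the inputs where the Python raises IndexError: a grid with no rows
-- (grid[0]) or a row shorter than the first row (grid[rowI][i] in colToNum); B raises there too.
def Pre_gridToNums (allGrids : List (List String)) : Prop :=
  ∀ grid ∈ allGrids, grid ≠ [] ∧ ∀ row ∈ grid, (grid.headD "").length ≤ row.length
instance (allGrids : List (List String)) : Decidable (Pre_gridToNums allGrids) := by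
  unfold Pre_gridToNums; infer_instance
def pvWitness_gridToNums : List (List String) := [["#.", ".#"], ["##"]]

def Spec_gridToNums (allGrids : List (List String)) (out : List (List Int × List Int)) : Prop := out = gridToNums_alt allGrids
instance (allGrids : List (List String)) (out : List (List Int × List Int)) : Decidable (Spec_gridToNums allGrids out) := by unfold Spec_gridToNums; infer_instance

-- ===== CLAIM (what is proved, stated in full; the proofs are below) =====
def Claim_equal_gridToNums : Prop := ∀ (allGrids : List (List String)), Dom_gridToNums allGrids → Pre_gridToNums allGrids → Spec_gridToNums allGrids (gridToNums allGrids)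

-- ===== LEMMAS AND PROOFS =====

-- common closed form of a row/line bitmask
def maskSpec (cs : List Char) : Int :=
  ((List.range cs.length).map (fun k => if cs.getD k ' ' = '#' then (2:Int) ^ k else 0)).sum

-- column sums with a shifted exponent (B's loop invariant)
def colSpecS (grid : List String) (c : Nat) (s : Nat) : Int :=
  ((List.range grid.length).map
    (fun r => if (grid.getD r "").toList.getD c ' ' = '#' then (2:Int) ^ (s + r) else 0)).sum

lemma lineToNum_eq_maskSpec (line : String) : lineToNum line = maskSpec line.toList := by
  unfold lineToNum maskSpec
  rw [show (fun (val : Int) (i : Int) =>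
        if PySem.List.pyGetD line.toList i ' ' = '#' then val + 2 ^ i.toNat else val)
      = (fun (val : Int) (i : Int) =>
        val + if PySem.List.pyGetD line.toList i ' ' = '#' then 2 ^ i.toNat else 0) by
    funext v i; split <;> simp]
  rw [PySem.Str.len_eq, PySem.List.pyRange_zero_nat, List.foldl_map, PySem.List.foldl_add]
  simp [PySem.List.pyGetD_natCast]

lemma one_shl (n : Nat) : (1:Int) <<< (n:Int) = 2 ^ n := by
  have h : (1:Int) <<< (n:Int) = ((1 <<< n : Nat) : Int) := by
    exact_mod_cast Int.shiftLeft_natCast 1 n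
  rw [h, Nat.one_shiftLeft]; push_cast; ring

lemma filter_map_sum (l : List (Int × Char)) (f : Int × Char → Int) :
    ((l.filter (fun p => p.2 = '#')).map f).sum
      = (l.map (fun p => if p.2 = '#' then f p else 0)).sum := by
  induction l with
  | nil => simp
  | cons x xs ih =>
    by_cases h : x.2 = '#' <;> simp [h, ih]

lemma enum_mask (cs : List Char) : ∀ (s : Nat),
    ((PySem.List.enumerate cs (s:Int)).map
      (fun p => if p.2 = '#' then (1:Int) <<< p.1.toNat else 0)).sum
    = ((List.range cs.length).map (fun k => if cs.getD k ' ' = '#' then (2:Int) ^ (s + k) else 0)).sum := by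
  induction cs with
  | nil => intro s; simp [PySem.List.enumerate]
  | cons c rest ih =>
    intro s
    rw [PySem.List.enumerate_cons]
    rw [show (c :: rest).length = rest.length + 1 from rfl, List.range_succ_eq_map]
    simp only [List.map_cons, List.sum_cons, List.map_map]
    have h1 : ((s:Int) + 1) = ((s+1 : Nat) : Int) := by push_cast; ring
    rw [h1, ih (s+1)]
    congr 1
    · rw [List.getD_cons_zero, Int.toNat_natCast, one_shl]
      simp
    · refine congrArg List.sum (List.map_congr_left (fun k _ => ?_))
      simp only [Function.comp_apply, Nat.succ_eq_add_one, List.getD_cons_succ]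
      rw [show s + 1 + k = s + (k + 1) from by omega]

lemma rowMask_eq_maskSpec (row : String) : rowMask row = maskSpec row.toList := by
  unfold rowMask maskSpec
  rw [filter_map_sum]
  rw [show PySem.List.enumerate row.toList = PySem.List.enumerate row.toList (((0:Nat)):Int) by
    norm_num]
  rw [enum_mask row.toList 0]
  simp

lemma colToNum_eq (grid : List String) (c : Nat) : colToNum grid (c : Int) = colSpecS grid c 0 := by
  unfold colToNum colSpecS
  rw [show (fun (val : Int) (rowI : Int) =>
        if PySem.List.pyGetD (PySem.List.pyGetD grid rowI "").toList (c:Int) ' ' = '#'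
        then val + 2 ^ rowI.toNat else val)
      = (fun (val : Int) (rowI : Int) =>
        val + if PySem.List.pyGetD (PySem.List.pyGetD grid rowI "").toList (c:Int) ' ' = '#'
        then 2 ^ rowI.toNat else 0) by
    funext v i; split <;> simp]
  rw [PySem.List.pyRange_zero_nat, List.foldl_map, PySem.List.foldl_add]
  simp [PySem.List.pyGetD_natCast]

-- getD after set
lemma getD_set (l : List Int) (i : Nat) (v : Int) (c : Nat) :
    (l.set i v).getD c 0 = if i = c ∧ i < l.length then v else l.getD c 0 := by
  rw [List.getD_eq_getElem?_getD, List.getD_eq_getElem?_getD, List.getElem?_set]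
  by_cases h : i = c
  · subst h; by_cases h2 : i < l.length <;> simp [h2]
  · simp [h]

-- the inner column loop of B, over Nat indices
def bAux (row : List Char) (r : Nat) (k : Nat) (cols : List Int) : List Int :=
  (List.range k).foldl
    (fun cs c => if row.getD c ' ' = '#' then cs.set c (cs.getD c 0 + (1 <<< r)) else cs) cols

lemma bAddRow_eq_bAux (row : List Char) (r : Nat) (w : Nat) (cols : List Int) :
    bAddRow (w : Int) row r cols = bAux row r w cols := by
  unfold bAddRow bAux
  rw [PySem.List.pyRange_zero_nat, List.foldl_map]
  congr 1
  funext cs c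
  simp [PySem.List.pyGetD_natCast]

lemma bAux_len (row : List Char) (r : Nat) : ∀ (k : Nat) (cols : List Int),
    (bAux row r k cols).length = cols.length := by
  intro k
  induction k with
  | zero => intro cols; simp [bAux]
  | succ k ih =>
    intro cols
    unfold bAux at *
    rw [List.range_succ, List.foldl_append]
    simp only [List.foldl_cons, List.foldl_nil]
    split
    · rw [List.length_set]; exact ih cols
    · exact ih cols

lemma bAux_getD (row : List Char) (r : Nat) : ∀ (k : Nat) (cols : List Int) (c : Nat),
    (bAux row r k cols).getD c 0
      = if c < k ∧ c < cols.length ∧ row.getD c ' ' = '#'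
        then cols.getD c 0 + ((1 <<< r : Nat) : Int) else cols.getD c 0 := by
  intro k
  induction k with
  | zero => intro cols c; simp [bAux]
  | succ k ih =>
    intro cols c
    have hl : (bAux row r k cols).length = cols.length := bAux_len row r k cols
    have hstep : bAux row r (k+1) cols
        = (if row.getD k ' ' = '#'
           then (bAux row r k cols).set k ((bAux row r k cols).getD k 0 + ((1 <<< r : Nat) : Int))
           else bAux row r k cols) := by
      unfold bAux
      rw [List.range_succ, List.foldl_append]
      simp only [List.foldl_cons, List.foldl_nil]
    rw [hstep]
    by_cases hk : row.getD k ' ' = '#'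
    · have hk' : row[k]?.getD ' ' = '#' := by
        rw [← List.getD_eq_getElem?_getD]; exact hk
      rw [if_pos hk, getD_set, ih cols c, ih cols k, hl]
      by_cases hkc : k = c
      · subst hkc
        by_cases h2 : k < cols.length
        · simp [hk', h2]
        · simp [hk', h2]
      · have hiff : (c < k + 1) ↔ (c < k) := by omega
        simp [hkc, hiff]
    · have hk' : ¬ row[k]?.getD ' ' = '#' := by
        rw [← List.getD_eq_getElem?_getD]; exact hk
      rw [if_neg hk, ih cols c]
      by_cases hck : c = k
      · subst hck; simp [hk']
      · have hiff : (c < k + 1) ↔ (c < k) := by omega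
        simp [hiff]

lemma colSpecS_cons (row : String) (rest : List String) (c : Nat) (s : Nat) :
    colSpecS (row :: rest) c s
      = (if row.toList.getD c ' ' = '#' then (2:Int) ^ s else 0) + colSpecS rest c (s+1) := by
  unfold colSpecS
  rw [show (row :: rest).length = rest.length.succ from rfl, List.range_succ_eq_map]
  simp only [List.map_cons, List.sum_cons, List.map_map, List.getD_cons_zero, Nat.add_zero]
  congr 1
  refine congrArg List.sum (List.map_congr_left (fun r _ => ?_))
  simp only [Function.comp_apply, Nat.succ_eq_add_one, List.getD_cons_succ]
  rw [show s + (r + 1) = s + 1 + r from by omega]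

-- B's grid loop invariant
lemma B_loop (w : Nat) : ∀ (grid : List String) (s : Nat) (acc : List Int) (cols : List Int),
    cols.length = w →
    (((PySem.List.enumerate grid (s:Int)).foldl
        (fun (st : List Int × List Int) p =>
          (st.1 ++ [rowMask p.2], bAddRow (w : Int) p.2.toList p.1.toNat st.2))
        (acc, cols)).1 = acc ++ grid.map rowMask)
    ∧ (((PySem.List.enumerate grid (s:Int)).foldl
        (fun (st : List Int × List Int) p =>
          (st.1 ++ [rowMask p.2], bAddRow (w : Int) p.2.toList p.1.toNat st.2))
        (acc, cols)).2.length = w)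
    ∧ ∀ c : Nat, c < w →
        (((PySem.List.enumerate grid (s:Int)).foldl
          (fun (st : List Int × List Int) p =>
            (st.1 ++ [rowMask p.2], bAddRow (w : Int) p.2.toList p.1.toNat st.2))
          (acc, cols)).2.getD c 0 = cols.getD c 0 + colSpecS grid c s) := by
  intro grid
  induction grid with
  | nil =>
    intro s acc cols hlen
    simp [PySem.List.enumerate, colSpecS, hlen]
  | cons row rest ih =>
    intro s acc cols hlen
    rw [PySem.List.enumerate_cons]
    have h1 : ((s:Int) + 1) = ((s+1 : Nat) : Int) := by push_cast; ring
    simp only [List.foldl_cons, h1, Int.toNat_natCast]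
    have hlen' : (bAddRow (w : Int) row.toList s cols).length = w := by
      rw [bAddRow_eq_bAux, bAux_len]; exact hlen
    obtain ⟨ha, hb, hc⟩ := ih (s+1) (acc ++ [rowMask row]) (bAddRow (w : Int) row.toList s cols) hlen'
    refine ⟨?_, hb, ?_⟩
    · rw [ha]; simp
    · intro c hcw
      rw [hc c hcw, colSpecS_cons]
      rw [bAddRow_eq_bAux, bAux_getD]
      have hcl : c < cols.length := by omega
      by_cases hh : row.toList.getD c ' ' = '#'
      · simp only [hcw, hcl, hh, and_self, if_true]
        have h2 : ((1 <<< s : Nat) : Int) = 2 ^ s := by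
          push_cast [Nat.one_shiftLeft]; ring
        rw [h2]; ring
      · simp only [hh, and_false, if_false]
        ring

-- per-grid equality
lemma perGrid (grid : List String) :
    ((grid.foldl (fun acc line => acc ++ [lineToNum line]) [],
      (PySem.List.pyRange 0 (PySem.Str.len (PySem.List.pyGetD grid 0 "")) 1).foldl
        (fun acc i => acc ++ [colToNum grid i]) []) : List Int × List Int)
    = ((PySem.List.enumerate grid).foldl
        (fun (st : List Int × List Int) p =>
          (st.1 ++ [rowMask p.2],
           bAddRow (PySem.Str.len (PySem.List.pyGetD grid 0 "")) p.2.toList p.1.toNat st.2))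
        ([], List.replicate (PySem.Str.len (PySem.List.pyGetD grid 0 "")).toNat 0)) := by
  set w : Nat := (PySem.List.pyGetD grid 0 "").toList.length with hw
  have hlen : PySem.Str.len (PySem.List.pyGetD grid 0 "") = (w : Int) := by
    rw [PySem.Str.len_eq]
  rw [hlen]
  simp only [Int.toNat_natCast]
  have hrep : (List.replicate ((w : Int)).toNat (0:Int)).length = w := by simp
  obtain ⟨ha, hb, hc⟩ := B_loop w grid 0 [] (List.replicate ((w : Int)).toNat 0) hrep
  simp only [Int.toNat_natCast, Nat.cast_zero] at ha hb hc
  refine Prod.ext ?_ ?_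
  · show grid.foldl (fun acc line => acc ++ [lineToNum line]) [] = _
    rw [PySem.List.foldl_append_singleton_eq_map, ha]
    simp only [List.nil_append]
    exact List.map_congr_left (fun line _ => by
      rw [lineToNum_eq_maskSpec, rowMask_eq_maskSpec])
  · show (PySem.List.pyRange 0 (w : Int) 1).foldl (fun acc i => acc ++ [colToNum grid i]) [] = _
    rw [PySem.List.pyRange_zero_nat, List.foldl_map]
    rw [show (fun (acc : List Int) (k : Nat) => acc ++ [colToNum grid (k : Int)])
        = (fun (acc : List Int) (k : Nat) => acc ++ [(fun k => colToNum grid (k : Int)) k]) from rfl]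
    rw [PySem.List.foldl_append_singleton_eq_map]
    refine List.ext_getElem ?_ ?_
    · simp [hb]
    · intro i h1 h2
      have hiw : i < w := by simpa using h1
      have hgd := hc i hiw
      rw [List.getD_eq_getElem?_getD, List.getElem?_eq_getElem h2] at hgd
      simp only [Option.getD_some] at hgd
      simp only [List.nil_append, List.getElem_map, List.getElem_range]
      rw [hgd, colToNum_eq, List.getD_replicate _ hiw]
      simp

-- ===== VERDICT (by name: the statement is the Claim_ definition above) =====
theorem gridToNums_spec : Claim_equal_gridToNums := by
  intro allGrids _ _
  unfold Spec_gridToNums gridToNums gridToNums_alt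
  rw [PySem.List.foldl_append_singleton_eq_map, PySem.List.foldl_append_singleton_eq_map]
  simp only [List.nil_append]
  exact List.map_congr_left (fun grid _ => perGrid grid)
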